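-- pv_equiv track=rewrite | github.com/denissfloww/ITvPS | Lab7/FPRcalculation.py | Count
-- ===== SOURCE A (Python) =====
-- def Count(sourceClasses, resultClasses, infoClasses):
--     for i in range(len(sourceClasses)):
--         if sourceClasses[i] == resultClasses[i]:
--             infoClasses[sourceClasses[i]][0] += 1
--         else:
--             infoClasses[sourceClasses[i]][1] += 1
--             infoClasses[resultClasses[i]][2] += 1
--     return infoClasses
-- ===== SOURCE B (Python) =====
-- def Count(sourceClasses, resultClasses, infoClasses):
--     pairs = list(zip(sourceClasses, resultClasses))
--     hits = {}
--     for s, r in pairs: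
--         if s == r:
--             hits[s] = hits.get(s, 0) + 1
--     missS = {}
--     for s, r in pairs:
--         if s != r:
--             missS[s] = missS.get(s, 0) + 1
--     missR = {}
--     for s, r in pairs:
--         if s != r:
--             missR[r] = missR.get(r, 0) + 1
--     for k, n in hits.items():
--         infoClasses[k][0] += n
--     for k, n in missS.items():
--         infoClasses[k][1] += n
--     for k, n in missR.items():
--         infoClasses[k][2] += n
--     return infoClasses
-- ===== Notes on version B (the rewrite author's own statement) =====
-- stated objective: alternative
-- what changed: B replaces A's single per-index loop of unit increments by staged passes: it first builds three per-class frequency dicts (hits, source-misses, result-misses) over the zipped observations, then applies one grouped += n per distinct class to each of the three counter positions of infoClasses, mutating and returning the same object.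
import Mathlib
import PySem

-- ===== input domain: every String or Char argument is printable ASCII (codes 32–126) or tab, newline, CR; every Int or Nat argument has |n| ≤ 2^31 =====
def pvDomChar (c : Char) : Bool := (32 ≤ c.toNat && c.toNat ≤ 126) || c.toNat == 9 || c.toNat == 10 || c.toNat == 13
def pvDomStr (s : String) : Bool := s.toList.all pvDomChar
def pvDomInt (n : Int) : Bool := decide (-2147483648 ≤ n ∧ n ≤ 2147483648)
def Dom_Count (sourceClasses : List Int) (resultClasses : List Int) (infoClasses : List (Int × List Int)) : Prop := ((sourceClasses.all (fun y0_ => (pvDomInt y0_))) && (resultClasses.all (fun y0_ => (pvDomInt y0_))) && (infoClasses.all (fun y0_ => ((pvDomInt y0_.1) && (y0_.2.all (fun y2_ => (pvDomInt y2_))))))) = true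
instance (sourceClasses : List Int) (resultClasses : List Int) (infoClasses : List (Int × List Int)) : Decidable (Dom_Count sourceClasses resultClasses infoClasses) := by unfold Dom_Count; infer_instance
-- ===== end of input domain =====

-- B builds three per-class frequency dicts (hits, source-misses, result-misses) in staged passes
-- and then applies one grouped increment per distinct class, instead of A's one unit increment per
-- index (alternative decomposition, same cost).  Both A and B mutate the infoClasses dict in place
-- and return it; the equivalence proved here is about the returned value.


-- ===== PORT A =====
-- `l[j] += 1` on a Python list l: exact when 0 ≤ j < len(l) (Python raises IndexError
-- otherwise; those inputs lie outside Pre_Count).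
def addAt (l : List Int) (j : Nat) (n : Int) : List Int :=
  match l, j with
  | [], _ => []
  | x :: xs, 0 => (x + n) :: xs
  | x :: xs, j + 1 => x :: addAt xs j n

def Count (sourceClasses : List Int) (resultClasses : List Int) (infoClasses : List (Int × List Int)) : List (Int × List Int) :=
  ((List.range sourceClasses.length).foldl (fun d i =>
      let s := sourceClasses.getD i 0
      let r := resultClasses.getD i 0
      if s = r then d.modify s [] (fun l => addAt l 0 1)
      else (d.modify s [] (fun l => addAt l 1 1)).modify r [] (fun l => addAt l 2 1))
    (PySem.Dict.mk infoClasses)).items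

-- ===== PORT B =====
-- `lst[j] += n` for B, written via List.set; exact where Python returns (in-range j;
-- out-of-range inputs lie outside Pre_Count).
def setAdd (l : List Int) (j : Nat) (n : Int) : List Int := l.set j (l.getD j 0 + n)

def Count_alt (sourceClasses : List Int) (resultClasses : List Int) (infoClasses : List (Int × List Int)) : List (Int × List Int) :=
  let pairs := sourceClasses.zip resultClasses
  let hits := pairs.foldl (fun c p =>
      if p.1 = p.2 then c.insert p.1 (c.getD p.1 0 + 1) else c) PySem.Dict.empty
  let missS := pairs.foldl (fun c p =>
      if p.1 ≠ p.2 then c.insert p.1 (c.getD p.1 0 + 1) else c) PySem.Dict.empty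
  let missR := pairs.foldl (fun c p =>
      if p.1 ≠ p.2 then c.insert p.2 (c.getD p.2 0 + 1) else c) PySem.Dict.empty
  let d1 := hits.items.foldl (fun d e => d.modify e.1 [] (fun l => setAdd l 0 e.2)) (PySem.Dict.mk infoClasses)
  let d2 := missS.items.foldl (fun d e => d.modify e.1 [] (fun l => setAdd l 1 e.2)) d1
  let d3 := missR.items.foldl (fun d e => d.modify e.1 [] (fun l => setAdd l 2 e.2)) d2
  d3.items

-- ===== PRECONDITION & SPEC =====
-- Pre_ is exactly where the Python A returns: every index of sourceClasses must also exist in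
-- resultClasses, each looked-up class must be a key of infoClasses with a counter list long
-- enough for the accessed position (otherwise A raises IndexError/KeyError).  The Nodup clause
-- excludes only association lists that do not represent a Python dict (duplicate keys).
def Pre_Count (sourceClasses : List Int) (resultClasses : List Int) (infoClasses : List (Int × List Int)) : Prop :=
  sourceClasses.length ≤ resultClasses.length ∧
  (infoClasses.map Prod.fst).Nodup ∧
  ∀ i ∈ List.range sourceClasses.length,
    (if sourceClasses.getD i 0 = resultClasses.getD i 0 then
      1 ≤ ((PySem.Dict.mk infoClasses).getD (sourceClasses.getD i 0) []).length
    else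
      2 ≤ ((PySem.Dict.mk infoClasses).getD (sourceClasses.getD i 0) []).length ∧
      3 ≤ ((PySem.Dict.mk infoClasses).getD (resultClasses.getD i 0) []).length)
instance (sourceClasses : List Int) (resultClasses : List Int) (infoClasses : List (Int × List Int)) : Decidable (Pre_Count sourceClasses resultClasses infoClasses) := by unfold Pre_Count; infer_instance

def pvWitness_Count : List Int × List Int × (List (Int × List Int)) :=
  ([0, 1], [0, 0], [(0, [0, 0, 0]), (1, [0, 0, 0])])

def Spec_Count (sourceClasses : List Int) (resultClasses : List Int) (infoClasses : List (Int × List Int)) (out : List (Int × List Int)) : Prop := out = Count_alt sourceClasses resultClasses infoClasses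
instance (sourceClasses : List Int) (resultClasses : List Int) (infoClasses : List (Int × List Int)) (out : List (Int × List Int)) : Decidable (Spec_Count sourceClasses resultClasses infoClasses out) := by unfold Spec_Count; infer_instance

-- ===== CLAIM (what is proved, stated in full; the proofs are below) =====
def Claim_equal_Count : Prop := ∀ (sourceClasses : List Int) (resultClasses : List Int) (infoClasses : List (Int × List Int)), Dom_Count sourceClasses resultClasses infoClasses → Pre_Count sourceClasses resultClasses infoClasses → Spec_Count sourceClasses resultClasses infoClasses (Count sourceClasses resultClasses infoClasses)

-- ===== LEMMAS AND PROOFS =====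

def apply3 (l : List Int) (a b c : Int) : List Int := addAt (addAt (addAt l 0 a) 1 b) 2 c

lemma setAdd_eq_addAt (l : List Int) (j : Nat) (n : Int) : setAdd l j n = addAt l j n := by
  induction l generalizing j with
  | nil => rfl
  | cons x xs ih => cases j with
    | zero => simp [setAdd, addAt]
    | succ j => simpa [setAdd, addAt] using ih j

lemma addAt_zero (l : List Int) (j : Nat) : addAt l j 0 = l := by
  induction l generalizing j with
  | nil => rfl
  | cons x xs ih => cases j with
    | zero => simp [addAt]
    | succ j => simp [addAt, ih]
lemma addAt_addAt (l : List Int) (i j : Nat) (a b : Int) :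
    addAt (addAt l i a) j b = addAt (addAt l j b) i a := by
  induction l generalizing i j with
  | nil => rfl
  | cons x xs ih =>
    cases i with
    | zero => cases j with
      | zero => simp [addAt]; ring
      | succ j => simp [addAt]
    | succ i => cases j with
      | zero => simp [addAt]
      | succ j => simp [addAt, ih]
lemma addAt_addAt_same (l : List Int) (j : Nat) (a b : Int) :
    addAt (addAt l j a) j b = addAt l j (a + b) := by
  induction l generalizing j with
  | nil => rfl
  | cons x xs ih => cases j with
    | zero => simp [addAt]; ring
    | succ j => simp [addAt, ih]

def wHit (k : Int) (p : Int × Int) : Bool := p.1 == p.2 && p.1 == k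
def wMissS (k : Int) (p : Int × Int) : Bool := !(p.1 == p.2) && p.1 == k
def wMissR (k : Int) (p : Int × Int) : Bool := !(p.1 == p.2) && p.2 == k

-- A's loop body, named for the lemmas below
def step1 (d : PySem.Dict Int (List Int)) (p : Int × Int) : PySem.Dict Int (List Int) :=
  if p.1 = p.2 then d.modify p.1 [] (fun l => addAt l 0 1)
  else (d.modify p.1 [] (fun l => addAt l 1 1)).modify p.2 [] (fun l => addAt l 2 1)
lemma step1_getD (d : PySem.Dict Int (List Int)) (p : Int × Int) (k : Int) :
    (step1 d p).getD k [] =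
      apply3 (d.getD k []) (if wHit k p then 1 else 0)
        (if wMissS k p then 1 else 0) (if wMissR k p then 1 else 0) := by
  unfold step1 wHit wMissS wMissR
  by_cases h1 : p.1 = p.2 <;> by_cases h2 : k = p.1 <;> by_cases h3 : k = p.2 <;>
    simp [PySem.Dict.getD_modify, apply3, addAt_zero, h1, h2, h3] <;>
    (try rw [if_neg (by omega)]) <;> (try rw [if_neg (by omega)]) <;> simp [addAt_zero]
lemma fold1_getD (ℓ : List (Int × Int)) (d : PySem.Dict Int (List Int)) (k : Int) :
    (ℓ.foldl step1 d).getD k [] =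
      apply3 (d.getD k []) (ℓ.countP (wHit k)) (ℓ.countP (wMissS k)) (ℓ.countP (wMissR k)) := by
  induction ℓ generalizing d with
  | nil => simp [apply3, addAt_zero]
  | cons p t ih =>
    simp only [List.foldl_cons, List.countP_cons]
    rw [ih, step1_getD]
    unfold apply3
    rw [addAt_addAt (addAt (addAt (d.getD k []) 0 _) 1 _) 2 0 _ _,
        addAt_addAt (addAt (d.getD k []) 0 _) 1 0 _ _,
        addAt_addAt_same (d.getD k []) 0,
        addAt_addAt (addAt (addAt (d.getD k []) 0 _) 1 _) 2 1 _ _,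
        addAt_addAt_same (addAt (d.getD k []) 0 _) 1,
        addAt_addAt_same _ 2]
    congr 1
    · congr 2 <;> (push_cast; split_ifs <;> ring)
    · push_cast; split_ifs <;> ring

-- B's counting loops compute the counter of the filtered, projected observation list
lemma foldl_filter_insert (keep : Int × Int → Prop) [DecidablePred keep]
    (sel : Int × Int → Int) (ℓ : List (Int × Int)) (c : PySem.Dict Int Int) :
    ℓ.foldl (fun c p => if keep p then c.insert (sel p) (c.getD (sel p) 0 + 1) else c) c =
      ((ℓ.filter (fun p => keep p)).map sel).foldl
        (fun c x => c.insert x (c.getD x 0 + 1)) c := by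
  induction ℓ generalizing c with
  | nil => rfl
  | cons p t ih =>
    by_cases h : keep p <;> simp [h, ih]

-- a phase fold of B: per key it adds the summed count at one fixed position
lemma foldPhase_getD (j : Nat) (ℓ : List (Int × Int)) (d : PySem.Dict Int (List Int)) (k : Int) :
    (ℓ.foldl (fun d e => d.modify e.1 [] (fun l => setAdd l j e.2)) d).getD k [] =
      addAt (d.getD k []) j ((ℓ.map (fun e => if e.1 = k then e.2 else 0)).sum) := by
  induction ℓ generalizing d with
  | nil => simp [addAt_zero]
  | cons e t ih =>
    simp only [List.foldl_cons, List.map_cons, List.sum_cons]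
    rw [ih]
    by_cases h : e.1 = k
    · rw [if_pos h, PySem.Dict.getD_modify, if_pos h.symm, setAdd_eq_addAt,
        addAt_addAt_same, h]
    · rw [if_neg h, PySem.Dict.getD_modify, if_neg (fun hk => h hk.symm), zero_add]

lemma sum_map_ite_filter (l : List Int) (q : Int → Bool) (f : Int → Int) :
    (l.map (fun x => if q x then f x else 0)).sum = ((l.filter q).map f).sum := by
  induction l with
  | nil => rfl
  | cons x t ih => by_cases h : q x <;> simp [h, ih]

lemma sum_counter_items (k : Int) (ℓ : List Int) :
    (((PySem.Dict.counter ℓ).items.map (fun e => if e.1 = k then e.2 else 0)).sum : Int) =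
      (ℓ.count k : Int) := by
  rw [PySem.Dict.items_counter, List.map_map]
  have hperm : (PySem.Set.ofList ℓ : List Int).Perm ℓ.dedup := by
    rw [List.perm_ext_iff_of_nodup (PySem.Set.nodup_ofList ℓ) ℓ.nodup_dedup]
    intro a
    rw [PySem.Set.mem_ofList, List.mem_dedup]
  rw [List.Perm.sum_eq (List.Perm.map _ hperm)]
  rw [show ((fun e : Int × Int => if e.1 = k then e.2 else 0) ∘
      fun x : Int => (x, ((ℓ.count x : Int)))) =
      fun x : Int => if (x == k : Bool) then (ℓ.count x : Int) else 0 by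
        funext x; simp]
  rw [sum_map_ite_filter]
  rw [List.count_eq_countP, ← List.sum_map_count_dedup_filter_eq_countP (· == k) ℓ]
  rw [Nat.cast_list_sum, List.map_map]
  refine congrArg List.sum (List.map_congr_left ?_)
  intro x _
  rfl

lemma keys_modify_mem (d : PySem.Dict Int (List Int)) (k : Int) (f : List Int → List Int)
    (h : k ∈ d.keys) : (d.modify k [] f).keys = d.keys := by
  rw [PySem.Dict.keys_modify, PySem.Dict.keys_insert_of_contains]
  exact (PySem.Dict.contains_iff_mem_keys d k).mpr h
lemma keys_foldPhase (j : Nat) (ℓ : List (Int × Int)) (d : PySem.Dict Int (List Int))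
    (h : ∀ e ∈ ℓ, e.1 ∈ d.keys) :
    (ℓ.foldl (fun d e => d.modify e.1 [] (fun l => setAdd l j e.2)) d).keys = d.keys := by
  induction ℓ generalizing d with
  | nil => rfl
  | cons e t ih =>
    have hk := keys_modify_mem d e.1 (fun l => setAdd l j e.2) (h e (by simp))
    rw [List.foldl_cons, ih _ (fun e' he' => by rw [hk]; exact h e' (List.mem_cons_of_mem _ he')), hk]
lemma keys_fold1 (ℓ : List (Int × Int)) (d : PySem.Dict Int (List Int))
    (h : ∀ p ∈ ℓ, p.1 ∈ d.keys ∧ p.2 ∈ d.keys) : (ℓ.foldl step1 d).keys = d.keys := by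
  induction ℓ generalizing d with
  | nil => rfl
  | cons p t ih =>
    have hk : (step1 d p).keys = d.keys := by
      unfold step1
      split_ifs with hc
      · exact keys_modify_mem d p.1 _ (h p (by simp)).1
      · rw [keys_modify_mem _ p.2 _ (by rw [keys_modify_mem d p.1 _ (h p (by simp)).1]; exact (h p (by simp)).2),
            keys_modify_mem d p.1 _ (h p (by simp)).1]
    rw [List.foldl_cons, ih (step1 d p) (fun p' hp' => by
      rw [hk]; exact h p' (List.mem_cons_of_mem _ hp')), hk]
lemma fold_range_getD {α β : Type} (g : β → α → β) (w : α) :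
    ∀ (ℓ : List α) (d : β),
      (List.range ℓ.length).foldl (fun d i => g d (ℓ.getD i w)) d = ℓ.foldl g d := by
  intro ℓ
  induction ℓ with
  | nil => intro d; rfl
  | cons x t ih =>
    intro d
    rw [List.length_cons, List.range_succ_eq_map, List.foldl_cons, List.foldl_map]
    simpa using ih (g d x)

lemma mem_keys_of_getD_len (d : PySem.Dict Int (List Int)) (s : Int)
    (h : 1 ≤ (d.getD s []).length) : s ∈ d.keys := by
  by_contra hc
  rw [PySem.Dict.getD_of_not_contains] at h
  · simp at h
  · rw [← Bool.not_eq_true, PySem.Dict.contains_iff_mem_keys]; exact hc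

-- counts of the three projected lists are the three countP's of the pair list
lemma count_map_filter (q : Int × Int → Bool) (sel : Int × Int → Int) (k : Int)
    (ℓ : List (Int × Int)) :
    ((ℓ.filter q).map sel).count k = ℓ.countP (fun p => q p && (sel p == k)) := by
  rw [List.count_eq_countP, List.countP_map, List.countP_filter]
  refine List.countP_congr (fun p _ => ?_)
  simp [Function.comp, Bool.and_comm]

lemma Count_eq : ∀ (src res : List Int) (info : List (Int × List Int)),
    src.length ≤ res.length → (info.map Prod.fst).Nodup →
    (∀ i ∈ List.range src.length,
      (if src.getD i 0 = res.getD i 0 then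
        1 ≤ ((PySem.Dict.mk info).getD (src.getD i 0) []).length
      else
        2 ≤ ((PySem.Dict.mk info).getD (src.getD i 0) []).length ∧
        3 ≤ ((PySem.Dict.mk info).getD (res.getD i 0) []).length)) →
    Count src res info = Count_alt src res info := by
  intro src res info hlen hnd hidx
  have hzl : (src.zip res).length = src.length := by
    rw [List.length_zip]; omega
  -- A's range loop is the zip loop
  have hA : Count src res info = ((src.zip res).foldl step1 (PySem.Dict.mk info)).items := by
    unfold Count
    congr 1
    have hcg : List.foldl (fun d i =>
        let s := src.getD i 0
        let r := res.getD i 0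
        if s = r then d.modify s [] (fun l => addAt l 0 1)
        else (d.modify s [] (fun l => addAt l 1 1)).modify r [] (fun l => addAt l 2 1))
        (PySem.Dict.mk info) (List.range src.length) =
        List.foldl (fun d i => step1 d ((src.zip res).getD i ((0 : Int), (0 : Int))))
        (PySem.Dict.mk info) (List.range src.length) := by
      apply PySem.List.foldl_congr_mem
      intro acc i hi
      rw [List.mem_range] at hi
      have h1 : i < (src.zip res).length := by omega
      have h2 : i < res.length := by omega
      show step1 acc (src.getD i 0, res.getD i 0) = step1 acc ((src.zip res).getD i (0, 0))
      congr 1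
      rw [List.getD_eq_getElem _ _ h1, List.getD_eq_getElem _ _ hi,
        List.getD_eq_getElem _ _ h2, List.getElem_zip]
    rw [hcg, ← hzl, fold_range_getD]
  -- B's staged folds, rewritten through the counter characterisation
  have hB0 : Count_alt src res info =
      (List.foldl (fun d e => d.modify e.1 [] (fun l => setAdd l 2 e.2))
        (List.foldl (fun d e => d.modify e.1 [] (fun l => setAdd l 1 e.2))
          (List.foldl (fun d e => d.modify e.1 [] (fun l => setAdd l 0 e.2))
            (PySem.Dict.mk info)
            (List.foldl (fun c p => if p.1 = p.2 then c.insert p.1 (c.getD p.1 0 + 1) else c) PySem.Dict.empty (src.zip res)).items)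
          (List.foldl (fun c p => if p.1 ≠ p.2 then c.insert p.1 (c.getD p.1 0 + 1) else c) PySem.Dict.empty (src.zip res)).items)
        (List.foldl (fun c p => if p.1 ≠ p.2 then c.insert p.2 (c.getD p.2 0 + 1) else c) PySem.Dict.empty (src.zip res)).items).items := rfl
  have hB : Count_alt src res info =
      ((PySem.Dict.counter (((src.zip res).filter (fun p => p.1 ≠ p.2)).map Prod.snd)).items.foldl
          (fun d e => d.modify e.1 [] (fun l => setAdd l 2 e.2))
        ((PySem.Dict.counter (((src.zip res).filter (fun p => p.1 ≠ p.2)).map Prod.fst)).items.foldl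
          (fun d e => d.modify e.1 [] (fun l => setAdd l 1 e.2))
          ((PySem.Dict.counter (((src.zip res).filter (fun p => p.1 = p.2)).map Prod.fst)).items.foldl
            (fun d e => d.modify e.1 [] (fun l => setAdd l 0 e.2))
            (PySem.Dict.mk info)))).items := by
    rw [hB0,
        foldl_filter_insert (fun p => p.1 = p.2) Prod.fst,
        foldl_filter_insert (fun p => p.1 ≠ p.2) Prod.fst,
        foldl_filter_insert (fun p => p.1 ≠ p.2) Prod.snd,
        PySem.Dict.foldl_insert_getD_add_one_eq_counter,
        PySem.Dict.foldl_insert_getD_add_one_eq_counter,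
        PySem.Dict.foldl_insert_getD_add_one_eq_counter]
  -- every class touched is already a key of info
  have hmem : ∀ p ∈ src.zip res, p.1 ∈ (PySem.Dict.mk info).keys ∧ p.2 ∈ (PySem.Dict.mk info).keys := by
    intro p hp
    obtain ⟨i, hi, hpi⟩ := List.mem_iff_getElem.mp hp
    have hi' : i < src.length := by omega
    rw [List.getElem_zip] at hpi
    have hgets : src.getD i 0 = p.1 := by
      rw [List.getD_eq_getElem _ _ hi']
      exact congrArg Prod.fst hpi
    have hgetr : res.getD i 0 = p.2 := by
      rw [List.getD_eq_getElem _ _ (by omega : i < res.length)]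
      exact congrArg Prod.snd hpi
    have hx := hidx i (List.mem_range.mpr hi')
    rw [hgets, hgetr] at hx
    by_cases hc : p.1 = p.2
    · rw [if_pos hc] at hx
      exact ⟨mem_keys_of_getD_len _ p.1 hx, hc ▸ mem_keys_of_getD_len _ p.1 hx⟩
    · rw [if_neg hc] at hx
      exact ⟨mem_keys_of_getD_len _ p.1 (by omega), mem_keys_of_getD_len _ p.2 (by omega)⟩
  have hmemL : ∀ (L : List Int), (∀ x ∈ L, x ∈ (PySem.Dict.mk info).keys) →
      ∀ e ∈ (PySem.Dict.counter L).items, e.1 ∈ (PySem.Dict.mk info).keys := by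
    intro L hL e he
    rw [PySem.Dict.items_counter] at he
    obtain ⟨k, hk, hke⟩ := List.mem_map.mp he
    exact hL e.1 (by rw [← hke]; exact (PySem.Set.mem_ofList _ k).mp hk)
  have hm1 : ∀ x ∈ ((src.zip res).filter (fun p => p.1 = p.2)).map Prod.fst,
      x ∈ (PySem.Dict.mk info).keys := by
    intro x hx
    obtain ⟨p, hp, hpx⟩ := List.mem_map.mp hx
    exact hpx ▸ (hmem p (List.mem_of_mem_filter hp)).1
  have hm2 : ∀ x ∈ ((src.zip res).filter (fun p => p.1 ≠ p.2)).map Prod.fst,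
      x ∈ (PySem.Dict.mk info).keys := by
    intro x hx
    obtain ⟨p, hp, hpx⟩ := List.mem_map.mp hx
    exact hpx ▸ (hmem p (List.mem_of_mem_filter hp)).1
  have hm3 : ∀ x ∈ ((src.zip res).filter (fun p => p.1 ≠ p.2)).map Prod.snd,
      x ∈ (PySem.Dict.mk info).keys := by
    intro x hx
    obtain ⟨p, hp, hpx⟩ := List.mem_map.mp hx
    exact hpx ▸ (hmem p (List.mem_of_mem_filter hp)).2
  have hndk : (PySem.Dict.mk info).keys.Nodup := hnd
  have kA := keys_fold1 (src.zip res) (PySem.Dict.mk info) hmem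
  have k1 := keys_foldPhase 0 (PySem.Dict.counter (((src.zip res).filter (fun p => p.1 = p.2)).map Prod.fst)).items
    (PySem.Dict.mk info) (hmemL _ hm1)
  have k2 := keys_foldPhase 1 (PySem.Dict.counter (((src.zip res).filter (fun p => p.1 ≠ p.2)).map Prod.fst)).items
    _ (by rw [k1]; exact hmemL _ hm2)
  have k3 := keys_foldPhase 2 (PySem.Dict.counter (((src.zip res).filter (fun p => p.1 ≠ p.2)).map Prod.snd)).items
    _ (by rw [k2, k1]; exact hmemL _ hm3)
  rw [hA, hB,
    PySem.Dict.items_eq_map_keys _ (kA ▸ hndk) ([] : List Int),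
    PySem.Dict.items_eq_map_keys _ ((k3.trans (k2.trans k1)) ▸ hndk) ([] : List Int),
    kA, k3, k2, k1]
  refine List.map_congr_left ?_
  intro k _
  have e1 : List.countP (fun p : Int × Int => decide (p.1 = p.2) && (p.1 == k)) (src.zip res) =
      List.countP (wHit k) (src.zip res) := by
    refine List.countP_congr (fun p _ => ?_)
    simp [wHit, Bool.and_comm]
  have e2 : List.countP (fun p : Int × Int => decide (p.1 ≠ p.2) && (p.1 == k)) (src.zip res) =
      List.countP (wMissS k) (src.zip res) := by
    refine List.countP_congr (fun p _ => ?_)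
    simp [wMissS, Bool.and_comm]
  have e3 : List.countP (fun p : Int × Int => decide (p.1 ≠ p.2) && (p.2 == k)) (src.zip res) =
      List.countP (wMissR k) (src.zip res) := by
    refine List.countP_congr (fun p _ => ?_)
    simp [wMissR, Bool.and_comm]
  rw [fold1_getD, foldPhase_getD, foldPhase_getD, foldPhase_getD,
      sum_counter_items, sum_counter_items, sum_counter_items,
      count_map_filter, count_map_filter, count_map_filter, e1, e2, e3]
  rfl

-- ===== VERDICT (by name: the statement is the Claim_ definition above) =====
theorem Count_spec : Claim_equal_Count := by
  intro sourceClasses resultClasses infoClasses _ hPre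
  obtain ⟨hlen, hnd, hidx⟩ := hPre
  show Count sourceClasses resultClasses infoClasses = Count_alt sourceClasses resultClasses infoClasses
  exact Count_eq sourceClasses resultClasses infoClasses hlen hnd hidx
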